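-- pv_equiv track=rewrite | github.com/coscristian/MisionTIC-2022-R2-Ciclo1-Fundamentos_de_Programacion | clase12/Solucion ejercicios/ejercicio7.py | tiene_dos_vocales
-- ===== SOURCE A (Python) =====
-- def tiene_dos_vocales(fruta:str):
--     vocales = "aeiou"
--     cont=0
--     for vocal in vocales:
--         for letra in fruta:
--             if vocal == letra:
--                 cont+=1
--     if cont == 2:
--         return True
--     else:
--         return False
-- ===== SOURCE B (Python) =====
-- def tiene_dos_vocales(fruta: str):
--     sin_vocales = fruta.translate(str.maketrans('', '', 'aeiou'))
--     return len(fruta) - len(sin_vocales) == 2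
-- ===== Notes on version B (the rewrite author's own statement) =====
-- stated objective: alternative
-- what changed: Replaces A's counter driven by five interpreted passes (one per vowel) with no counter at all: B deletes the vowels via str.translate in one C-level pass and tests whether the length dropped by exactly 2.
import Mathlib
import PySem

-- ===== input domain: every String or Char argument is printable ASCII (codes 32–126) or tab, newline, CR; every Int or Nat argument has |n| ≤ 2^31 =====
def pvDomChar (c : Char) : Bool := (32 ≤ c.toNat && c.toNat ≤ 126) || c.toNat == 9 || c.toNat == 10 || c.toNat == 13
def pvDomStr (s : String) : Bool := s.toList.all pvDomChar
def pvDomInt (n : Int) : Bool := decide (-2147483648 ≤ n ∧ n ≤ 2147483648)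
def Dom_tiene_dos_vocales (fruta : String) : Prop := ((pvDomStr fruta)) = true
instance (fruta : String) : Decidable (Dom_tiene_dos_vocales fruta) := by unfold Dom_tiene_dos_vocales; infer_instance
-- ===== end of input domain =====

-- B keeps no counter: it deletes the vowels (str.translate) and checks the length dropped by 2; objective: alternative.

-- ===== PORT A =====
-- literal port: outer loop over the vowels, inner loop over fruta, counter cont
def tiene_dos_vocales (fruta : String) : Bool :=
  let vocales := "aeiou"
  let cont : Int :=
    vocales.toList.foldl
      (fun cont vocal =>
        fruta.toList.foldl (fun cont letra => if vocal == letra then cont + 1 else cont) cont)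
      0
  if cont == 2 then true else false

-- ===== PORT B =====
-- str.translate deleting "aeiou" = keep the non-vowel characters; then compare lengths
def tiene_dos_vocales_alt (fruta : String) : Bool :=
  let sin_vocales := fruta.toList.filter (fun c => !("aeiou".toList.contains c))
  ((fruta.toList.length : Int) - sin_vocales.length) == 2

-- ===== PRECONDITION & SPEC =====
def Spec_tiene_dos_vocales (fruta : String) (out : Bool) : Prop := out = tiene_dos_vocales_alt fruta
instance (fruta : String) (out : Bool) : Decidable (Spec_tiene_dos_vocales fruta out) := by unfold Spec_tiene_dos_vocales; infer_instance

-- ===== CLAIM (what is proved, stated in full; the proofs are below) =====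
def Claim_equal_tiene_dos_vocales : Prop := ∀ (fruta : String), Dom_tiene_dos_vocales fruta → Spec_tiene_dos_vocales fruta (tiene_dos_vocales fruta)

-- ===== LEMMAS AND PROOFS =====

-- A's inner loop adds, to its incoming accumulator, the number of occurrences of vocal
theorem inner_foldl_count (v : Char) (l : List Char) (n : Int) :
    l.foldl (fun cont letra => if v == letra then cont + 1 else cont) n
      = n + (l.countP (fun letra => v == letra) : Int) := by
  induction l generalizing n with
  | nil => simp
  | cons c t ih =>
    simp only [List.foldl_cons, List.countP_cons]
    rw [ih]
    by_cases h : v == c <;> simp only [h, if_true] <;> push_cast <;> ring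

-- per-character identity: the five vowel tests sum to the membership test
theorem key_char (c : Char) :
    ((if 'a' == c then 1 else 0) + (if 'e' == c then 1 else 0) + (if 'i' == c then 1 else 0)
      + (if 'o' == c then 1 else 0) + (if 'u' == c then 1 else 0) : Nat)
      = (if ['a','e','i','o','u'].contains c then 1 else 0) := by
  by_cases h1 : c = 'a'
  · subst h1; decide
  by_cases h2 : c = 'e'
  · subst h2; decide
  by_cases h3 : c = 'i'
  · subst h3; decide
  by_cases h4 : c = 'o'
  · subst h4; decide
  by_cases h5 : c = 'u'
  · subst h5; decide
  simp [beq_iff_eq, h1, h2, h3, h4, h5,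
    Ne.symm h1, Ne.symm h2, Ne.symm h3, Ne.symm h4, Ne.symm h5]

-- per-vowel counts sum to the single vowel count
theorem sum_counts (l : List Char) :
    l.countP (fun x => 'a' == x) + l.countP (fun x => 'e' == x)
      + l.countP (fun x => 'i' == x) + l.countP (fun x => 'o' == x)
      + l.countP (fun x => 'u' == x)
      = l.countP (fun c => ['a','e','i','o','u'].contains c) := by
  induction l with
  | nil => simp
  | cons c t ih =>
    simp only [List.countP_cons]
    have k := key_char c
    omega

-- length minus the kept non-vowels is the vowel count
theorem len_sub_filter (l : List Char) :
    l.length - (l.filter (fun c => !(['a','e','i','o','u'].contains c))).length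
      = l.countP (fun c => ['a','e','i','o','u'].contains c) := by
  have h := l.length_eq_countP_add_countP (p := fun c => ['a','e','i','o','u'].contains c)
  have h2 : (l.filter (fun c => !(['a','e','i','o','u'].contains c))).length
      = l.countP (fun a => decide ¬(['a','e','i','o','u'].contains a = true)) := by
    rw [← List.countP_eq_length_filter]
    apply List.countP_congr
    intro a _
    simp
  omega

theorem filter_le_len (l : List Char) :
    (l.filter (fun c => !(['a','e','i','o','u'].contains c))).length ≤ l.length :=
  List.length_filter_le _ _

-- ===== VERDICT (by name: the statement is the Claim_ definition above) =====
theorem tiene_dos_vocales_spec : Claim_equal_tiene_dos_vocales := by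
  intro fruta _
  unfold Spec_tiene_dos_vocales tiene_dos_vocales tiene_dos_vocales_alt
  simp only [show ("aeiou".toList) = ['a','e','i','o','u'] from rfl, List.foldl,
    inner_foldl_count]
  have hs := sum_counts fruta.toList
  have hl := len_sub_filter fruta.toList
  have hle := filter_le_len fruta.toList
  cases hb : (((fruta.toList.length : Int)
      - (fruta.toList.filter (fun c => !(['a','e','i','o','u'].contains c))).length) == 2) <;>
    simp_all <;> omega
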